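-- pv_equiv track=rewrite | github.com/DivyankLosse/Sign-Bridge | backend/app/text_to_sign/speech_processor.py | detect_tense
-- ===== SOURCE A (Python) =====
-- from typing import List, Tuple, Optional
--
-- def detect_tense(tagged_words: List[Tuple[str, str]]) -> str:
--     tense_counts = {"future": 0, "present": 0, "past": 0, "present_continuous": 0}
--     for word, tag in tagged_words:
--         if tag == "MD": tense_counts["future"] += 1
--         elif tag == "VBG": tense_counts["present_continuous"] += 1
--         elif tag in ["VBP", "VBZ"]: tense_counts["present"] += 1
--         elif tag in ["VBD", "VBN"]: tense_counts["past"] += 1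
--
--     if tense_counts["past"] >= 1: return "past"
--     elif tense_counts["future"] >= 1: return "future"
--     elif tense_counts["present_continuous"] >= 1: return "present_continuous"
--     return "present"
-- ===== SOURCE B (Python) =====
-- _PRIORITY = {"VBD": 0, "VBN": 0, "MD": 1, "VBG": 2}
-- _TENSE = ("past", "future", "present_continuous", "present")
--
-- def detect_tense(tagged_words):
--     best = 3
--     for _word, tag in tagged_words:
--         best = min(best, _PRIORITY.get(tag, 3))
--     return _TENSE[best]
-- ===== Notes on version B (the rewrite author's own statement) =====
-- stated objective: simpler
-- what changed: Replaces the four-counter dict plus four-branch final cascade with a single running minimum-priority accumulator over a tag->rank map, returning the tense indexed by the final rank.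
import Mathlib
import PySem

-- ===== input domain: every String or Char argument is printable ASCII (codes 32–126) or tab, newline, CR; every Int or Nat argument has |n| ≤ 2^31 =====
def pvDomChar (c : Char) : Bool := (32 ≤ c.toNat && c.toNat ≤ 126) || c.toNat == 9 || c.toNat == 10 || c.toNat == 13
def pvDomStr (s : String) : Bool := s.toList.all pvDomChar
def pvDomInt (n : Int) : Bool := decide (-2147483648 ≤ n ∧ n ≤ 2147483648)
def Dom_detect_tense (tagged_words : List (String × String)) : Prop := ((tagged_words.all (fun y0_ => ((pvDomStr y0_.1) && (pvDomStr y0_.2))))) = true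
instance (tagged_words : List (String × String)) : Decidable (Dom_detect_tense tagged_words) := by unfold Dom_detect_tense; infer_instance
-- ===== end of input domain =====

-- B replaces A's four-counter dict and four-branch final cascade with a single
-- running minimum-priority accumulator (objective: simpler).

-- ===== PORT A =====
def tenseStep (d : PySem.Dict String Int) (wt : String × String) : PySem.Dict String Int :=
  if wt.2 == "MD" then d.modify "future" 0 (· + 1)
  else if wt.2 == "VBG" then d.modify "present_continuous" 0 (· + 1)
  else if wt.2 == "VBP" || wt.2 == "VBZ" then d.modify "present" 0 (· + 1)
  else if wt.2 == "VBD" || wt.2 == "VBN" then d.modify "past" 0 (· + 1)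
  else d

def detect_tense (tagged_words : List (String × String)) : String :=
  let d := tagged_words.foldl tenseStep
    (PySem.Dict.ofList [("future", 0), ("present", 0), ("past", 0), ("present_continuous", 0)])
  if 1 ≤ d.getD "past" 0 then "past"
  else if 1 ≤ d.getD "future" 0 then "future"
  else if 1 ≤ d.getD "present_continuous" 0 then "present_continuous"
  else "present"

-- ===== PORT B =====
def pvPriority : PySem.Dict String Int :=
  PySem.Dict.ofList [("VBD", 0), ("VBN", 0), ("MD", 1), ("VBG", 2)]

def pvTense : List String := ["past", "future", "present_continuous", "present"]

def detect_tense_alt (tagged_words : List (String × String)) : String :=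
  let best := tagged_words.foldl (fun best wt => min best (pvPriority.getD wt.2 3)) (3 : Int)
  PySem.List.pyGetD pvTense best ""

-- ===== PRECONDITION & SPEC =====
def Spec_detect_tense (tagged_words : List (String × String)) (out : String) : Prop := out = detect_tense_alt tagged_words
instance (tagged_words : List (String × String)) (out : String) : Decidable (Spec_detect_tense tagged_words out) := by unfold Spec_detect_tense; infer_instance

-- ===== CLAIM (what is proved, stated in full; the proofs are below) =====
def Claim_equal_detect_tense : Prop := ∀ (tagged_words : List (String × String)), Dom_detect_tense tagged_words → Spec_detect_tense tagged_words (detect_tense tagged_words)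

-- ===== LEMMAS AND PROOFS =====

-- the loop invariant tying A's dict of counters to B's running minimum rank
def tenseInv (d : PySem.Dict String Int) (b : Int) : Prop :=
  0 ≤ d.getD "past" 0 ∧ 0 ≤ d.getD "future" 0 ∧ 0 ≤ d.getD "present_continuous" 0 ∧
  0 ≤ b ∧ b ≤ 3 ∧
  (b ≤ 0 ↔ 1 ≤ d.getD "past" 0) ∧
  (b ≤ 1 ↔ 1 ≤ d.getD "past" 0 ∨ 1 ≤ d.getD "future" 0) ∧
  (b ≤ 2 ↔ 1 ≤ d.getD "past" 0 ∨ 1 ≤ d.getD "future" 0 ∨ 1 ≤ d.getD "present_continuous" 0)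

lemma pvPriority_getD_other (tag : String) (h1 : ¬ tag = "VBD") (h2 : ¬ tag = "VBN")
    (h3 : ¬ tag = "MD") (h4 : ¬ tag = "VBG") : pvPriority.getD tag 3 = 3 := by
  have b1 : ("VBD" == tag) = false := by simp [beq_eq_false_iff_ne]; exact fun e => h1 e.symm
  have b2 : ("VBN" == tag) = false := by simp [beq_eq_false_iff_ne]; exact fun e => h2 e.symm
  have b3 : ("MD" == tag) = false := by simp [beq_eq_false_iff_ne]; exact fun e => h3 e.symm
  have b4 : ("VBG" == tag) = false := by simp [beq_eq_false_iff_ne]; exact fun e => h4 e.symm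
  rw [show pvPriority = PySem.Dict.mk [("VBD", (0:Int)), ("VBN", 0), ("MD", 1), ("VBG", 2)] from by decide]
  simp [PySem.Dict.getD, b1, b2, b3, b4, PySem.Dict.get?]

lemma tenseInv_step (d : PySem.Dict String Int) (b : Int) (wt : String × String)
    (h : tenseInv d b) : tenseInv (tenseStep d wt) (min b (pvPriority.getD wt.2 3)) := by
  obtain ⟨hp, hf, hc, hb0, hb3, h0, h1, h2⟩ := h
  by_cases hMD : wt.2 = "MD"
  · have estep : tenseStep d wt = d.modify "future" 0 (· + 1) := by simp [tenseStep, hMD]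
    have erank : pvPriority.getD wt.2 3 = 1 := by rw [hMD]; decide
    have e1 : (d.modify "future" 0 (· + 1)).getD "past" 0 = d.getD "past" 0 := by
      rw [PySem.Dict.getD_modify]; simp
    have e2 : (d.modify "future" 0 (· + 1)).getD "future" 0 = d.getD "future" 0 + 1 := by
      rw [PySem.Dict.getD_modify]; simp
    have e3 : (d.modify "future" 0 (· + 1)).getD "present_continuous" 0 = d.getD "present_continuous" 0 := by
      rw [PySem.Dict.getD_modify]; simp
    unfold tenseInv
    rw [estep, erank, e1, e2, e3]
    omega
  · by_cases hVBG : wt.2 = "VBG"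
    · have estep : tenseStep d wt = d.modify "present_continuous" 0 (· + 1) := by
        simp [tenseStep, hVBG]
      have erank : pvPriority.getD wt.2 3 = 2 := by rw [hVBG]; decide
      have e1 : (d.modify "present_continuous" 0 (· + 1)).getD "past" 0 = d.getD "past" 0 := by
        rw [PySem.Dict.getD_modify]; simp
      have e2 : (d.modify "present_continuous" 0 (· + 1)).getD "future" 0 = d.getD "future" 0 := by
        rw [PySem.Dict.getD_modify]; simp
      have e3 : (d.modify "present_continuous" 0 (· + 1)).getD "present_continuous" 0 = d.getD "present_continuous" 0 + 1 := by
        rw [PySem.Dict.getD_modify]; simp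
      unfold tenseInv
      rw [estep, erank, e1, e2, e3]
      omega
    · by_cases hPres : wt.2 = "VBP" ∨ wt.2 = "VBZ"
      · have estep : tenseStep d wt = d.modify "present" 0 (· + 1) := by
          rcases hPres with h | h <;> simp [tenseStep, h]
        have erank : pvPriority.getD wt.2 3 = 3 := by
          rcases hPres with h | h <;> rw [h] <;> decide
        have e1 : (d.modify "present" 0 (· + 1)).getD "past" 0 = d.getD "past" 0 := by
          rw [PySem.Dict.getD_modify]; simp
        have e2 : (d.modify "present" 0 (· + 1)).getD "future" 0 = d.getD "future" 0 := by
          rw [PySem.Dict.getD_modify]; simp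
        have e3 : (d.modify "present" 0 (· + 1)).getD "present_continuous" 0 = d.getD "present_continuous" 0 := by
          rw [PySem.Dict.getD_modify]; simp
        unfold tenseInv
        rw [estep, erank, e1, e2, e3]
        omega
      · by_cases hPast : wt.2 = "VBD" ∨ wt.2 = "VBN"
        · have estep : tenseStep d wt = d.modify "past" 0 (· + 1) := by
                        rcases hPast with h | h <;> simp [tenseStep, h]
          have erank : pvPriority.getD wt.2 3 = 0 := by
            rcases hPast with h | h <;> rw [h] <;> decide
          have e1 : (d.modify "past" 0 (· + 1)).getD "past" 0 = d.getD "past" 0 + 1 := by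
            rw [PySem.Dict.getD_modify]; simp
          have e2 : (d.modify "past" 0 (· + 1)).getD "future" 0 = d.getD "future" 0 := by
            rw [PySem.Dict.getD_modify]; simp
          have e3 : (d.modify "past" 0 (· + 1)).getD "present_continuous" 0 = d.getD "present_continuous" 0 := by
            rw [PySem.Dict.getD_modify]; simp
          unfold tenseInv
          rw [estep, erank, e1, e2, e3]
          omega
        · push Not at hPres hPast
          have estep : tenseStep d wt = d := by
            simp [tenseStep, hMD, hVBG, hPres.1, hPres.2, hPast.1, hPast.2]
          have erank : pvPriority.getD wt.2 3 = 3 :=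
            pvPriority_getD_other wt.2 hPast.1 hPast.2 hMD hVBG
          rw [estep, erank]
          exact ⟨hp, hf, hc, by omega, by omega, by omega, by omega, by omega⟩

lemma tense_main (tw : List (String × String)) (d : PySem.Dict String Int) (b : Int)
    (h : tenseInv d b) :
    (if 1 ≤ (tw.foldl tenseStep d).getD "past" 0 then "past"
     else if 1 ≤ (tw.foldl tenseStep d).getD "future" 0 then "future"
     else if 1 ≤ (tw.foldl tenseStep d).getD "present_continuous" 0 then "present_continuous"
     else "present")
    = PySem.List.pyGetD pvTense (tw.foldl (fun best wt => min best (pvPriority.getD wt.2 3)) b) "" := by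
  induction tw generalizing d b with
  | nil =>
    obtain ⟨hp, hf, hc, hb0, hb3, h0, h1, h2⟩ := h
    simp only [List.foldl_nil]
    interval_cases b
    · rw [if_pos (h0.mp le_rfl)]; decide
    · have np : ¬ 1 ≤ d.getD "past" 0 := fun hx => by omega
      have nf : 1 ≤ d.getD "future" 0 := by omega
      rw [if_neg np, if_pos nf]; decide
    · have np : ¬ 1 ≤ d.getD "past" 0 := fun hx => by omega
      have nf : ¬ 1 ≤ d.getD "future" 0 := fun hx => by omega
      have nc : 1 ≤ d.getD "present_continuous" 0 := by omega
      rw [if_neg np, if_neg nf, if_pos nc]; decide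
    · have np : ¬ 1 ≤ d.getD "past" 0 := fun hx => by omega
      have nf : ¬ 1 ≤ d.getD "future" 0 := fun hx => by omega
      have nc : ¬ 1 ≤ d.getD "present_continuous" 0 := fun hx => by omega
      rw [if_neg np, if_neg nf, if_neg nc]; decide
  | cons wt tw ih =>
    simp only [List.foldl_cons]
    exact ih _ _ (tenseInv_step d b wt h)

-- ===== VERDICT (by name: the statement is the Claim_ definition above) =====
theorem detect_tense_spec : Claim_equal_detect_tense := by
  intro tw _
  unfold Spec_detect_tense detect_tense detect_tense_alt
  exact tense_main tw _ 3 (by unfold tenseInv; refine ⟨?_, ?_, ?_, ?_, ?_, ?_, ?_, ?_⟩ <;> decide)
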